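-- pv_equiv track=rewrite | github.com/xonsh/xonsh | xonsh/cli_utils.py | get_param_doc
-- ===== SOURCE A (Python) =====
-- from collections import defaultdict
--
-- def get_param_doc(lines: list[str]):
--     docs: dict[str, list[str]] = defaultdict(list)
--     name = None
--
--     while lines:
--         # check new section by checking next line
--         if len(lines) > 1 and (set(lines[1].strip()) == {"-"}):
--             break
--
--         lin = lines.pop(0)
--
--         if not lin:
--             continue
--
--         if lin.startswith(" ") and name:
--             docs[name].append(lin)
--         else:
--             name = lin
--
--     return docs, lines
-- ===== SOURCE B (Python) =====
-- from collections import defaultdict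
--
--
-- def _is_divider(s):
--     t = s.strip()
--     return bool(t) and set(t) == {"-"}
--
--
-- def get_param_doc(lines: list[str]):
--     # pass 1: find the stop boundary (first i with a divider on the NEXT line)
--     stop = len(lines)
--     for i in range(len(lines) - 1):
--         if _is_divider(lines[i + 1]):
--             stop = i
--             break
--     # pass 2: group the prefix
--     docs: dict[str, list[str]] = defaultdict(list)
--     name = None
--     for lin in lines[:stop]:
--         if not lin:
--             continue
--         if lin.startswith(" ") and name:
--             docs[name].append(lin)
--         else:
--             name = lin
--     del lines[:stop]  # same in-place consumption as A
--     return docs, lines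
-- ===== Notes on version B (the rewrite author's own statement) =====
-- stated objective: faster
-- what changed: Replaces A's single destructive while-loop that interleaves the lookahead divider break with pop(0)-consumption by two separate passes: first compute the stop boundary by scanning for a divider line, then group lines[:stop] and delete the prefix in one del, removing the repeated O(n) list shifts of pop(0).
import Mathlib
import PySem

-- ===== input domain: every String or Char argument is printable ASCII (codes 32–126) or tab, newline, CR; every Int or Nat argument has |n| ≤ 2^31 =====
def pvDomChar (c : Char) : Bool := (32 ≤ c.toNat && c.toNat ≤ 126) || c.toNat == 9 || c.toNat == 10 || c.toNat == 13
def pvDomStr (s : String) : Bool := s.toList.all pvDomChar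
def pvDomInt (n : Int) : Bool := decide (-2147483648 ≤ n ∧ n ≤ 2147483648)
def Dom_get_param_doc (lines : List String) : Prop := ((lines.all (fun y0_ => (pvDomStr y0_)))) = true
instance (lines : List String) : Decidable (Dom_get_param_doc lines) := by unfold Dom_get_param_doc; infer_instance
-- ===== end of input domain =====

-- B separates A's destructive while-loop into a boundary scan plus a grouping fold over the
-- prefix; equivalence is about the RETURN value (both Pythons consume the prefix of `lines` in place).

-- ===== PORT A =====
-- set(lines[1].strip()) == {"-"}
def pvDividerA (s : String) : Bool :=
  PySem.Set.equal (PySem.Set.ofList (PySem.Str.strip s).toList) (PySem.Set.ofList ['-'])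

-- truthiness of `name` (None or a string)
def pvTruthyA : Option String → Bool
  | none => false
  | some s => s ≠ ""

-- the while-loop: state (docs, name), popping from the front of `lines`
def pvLoopA (docs : PySem.Dict String (List String)) (name : Option String) :
    List String → PySem.Dict String (List String) × List String
  | [] => (docs, [])
  | lin :: rest =>
    if _h : rest.length > 0 ∧ pvDividerA rest.head! then
      (docs, lin :: rest)
    else if lin = "" then
      pvLoopA docs name rest
    else if PySem.Str.startswith lin " " ∧ pvTruthyA name then
      pvLoopA (docs.modify (name.getD "") [] (fun l => l ++ [lin])) name rest
    else
      pvLoopA docs (some lin) rest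

def get_param_doc (lines : List String) : (List (String × List String)) × List String :=
  let (docs, rest) := pvLoopA PySem.Dict.empty none lines
  (docs.items, rest)

-- ===== PORT B =====
-- t = s.strip(); bool(t) and set(t) == {"-"}
def pvDividerB (s : String) : Bool :=
  let t := PySem.Str.strip s
  t ≠ "" && PySem.Set.equal (PySem.Set.ofList t.toList) (PySem.Set.ofList ['-'])

-- pass 1: the stop boundary — first i with a divider at i+1, else len(lines)
def pvStopB : List String → Nat
  | [] => 0
  | [_] => 1
  | _ :: r1 :: rest => if pvDividerB r1 then 0 else pvStopB (r1 :: rest) + 1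

-- truthiness of `name`
def pvTruthyB : Option String → Bool
  | none => false
  | some s => s ≠ ""

-- pass 2: the grouping step of the for-loop
def pvStepB (acc : PySem.Dict String (List String) × Option String) (lin : String) :
    PySem.Dict String (List String) × Option String :=
  if lin = "" then acc
  else if PySem.Str.startswith lin " " ∧ pvTruthyB acc.2 then
    (acc.1.modify (acc.2.getD "") [] (fun l => l ++ [lin]), acc.2)
  else (acc.1, some lin)

def get_param_doc_alt (lines : List String) : (List (String × List String)) × List String :=
  let stop := pvStopB lines
  let docs := ((lines.take stop).foldl pvStepB (PySem.Dict.empty, none)).1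
  (docs.items, lines.drop stop)

-- ===== PRECONDITION & SPEC =====
def Spec_get_param_doc (lines : List String) (out : (List (String × List String)) × List String) : Prop := out = get_param_doc_alt lines
instance (lines : List String) (out : (List (String × List String)) × List String) : Decidable (Spec_get_param_doc lines out) := by unfold Spec_get_param_doc; infer_instance

-- ===== CLAIM (what is proved, stated in full; the proofs are below) =====
def Claim_equal_get_param_doc : Prop := ∀ (lines : List String), Dom_get_param_doc lines → Spec_get_param_doc lines (get_param_doc lines)

-- ===== LEMMAS AND PROOFS =====

theorem pvTruthy_eq (o : Option String) : pvTruthyB o = pvTruthyA o := by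
  cases o <;> rfl

-- the empty-set guard in B's divider test is redundant: set("") ≠ {"-"}
theorem pvDivider_eq (s : String) : pvDividerB s = pvDividerA s := by
  unfold pvDividerA pvDividerB
  by_cases h : PySem.Str.strip s = ""
  · simp [h]
    decide
  · simp [h]

theorem pvLoopA_eq (lines : List String) :
    ∀ (docs : PySem.Dict String (List String)) (name : Option String),
      pvLoopA docs name lines =
        (((lines.take (pvStopB lines)).foldl pvStepB (docs, name)).1,
          lines.drop (pvStopB lines)) := by
  induction lines with
  | nil => intro docs name; simp [pvLoopA, pvStopB]
  | cons lin rest ih =>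
    intro docs name
    match rest with
    | [] =>
      rw [pvLoopA, dif_neg (by simp)]
      show _ = ((List.foldl pvStepB (docs, name) (List.take (pvStopB [lin]) [lin])).1,
        List.drop (pvStopB [lin]) [lin])
      simp only [pvStopB, List.take, List.drop, List.foldl, pvStepB, pvTruthy_eq]
      split_ifs with h1 h2 <;> simp [pvLoopA]
    | r1 :: rest' =>
      rw [pvLoopA]
      by_cases hd : pvDividerA r1
      · have : (r1 :: rest').length > 0 ∧ pvDividerA (r1 :: rest').head! := by
          simp [hd]
        rw [dif_pos this]
        simp [pvStopB, pvDivider_eq, hd]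
      · have hB : pvDividerB r1 = false := by rw [pvDivider_eq]; simpa using hd
        have hno : ¬((r1 :: rest').length > 0 ∧ pvDividerA (r1 :: rest').head!) := by
          simp [hd]
        rw [dif_neg hno]
        have hstop : pvStopB (lin :: r1 :: rest') = pvStopB (r1 :: rest') + 1 := by
          simp [pvStopB, hB]
        rw [hstop]
        simp only [List.take_succ_cons, List.drop_succ_cons, List.foldl_cons]
        split_ifs with h1 h2
        · rw [ih]; simp only [pvStepB, if_pos h1]
        · rw [ih]; simp only [pvStepB, pvTruthy_eq]; rw [if_neg h1, if_pos h2]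
        · rw [ih]; simp only [pvStepB, pvTruthy_eq]; rw [if_neg h1, if_neg h2]

-- ===== VERDICT (by name: the statement is the Claim_ definition above) =====
theorem get_param_doc_spec : Claim_equal_get_param_doc := by
  intro lines _
  unfold Spec_get_param_doc get_param_doc get_param_doc_alt
  rw [pvLoopA_eq]
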